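-- pv_equiv track=rewrite | github.com/full-fool/GBL | tests/test-while4.py | foo
-- ===== SOURCE A (Python) =====
-- def foo(a):
--     j = None
--     j = 0
--     while ((a) > (0)):
--         if ((a) == (5)):
--             a = (a) - (1)
--             continue
--         j = (j) + (2)
--         a = (a) - (1)
--     return j
--     pass
-- ===== SOURCE B (Python) =====
-- def foo(a):
--     # closed form: loop adds 2 for each step from a down to 1, skipping the step at a==5
--     if a <= 0:
--         return 0
--     return 2 * (a - 1) if a >= 5 else 2 * a
-- ===== Notes on version B (the rewrite author's own statement) =====
-- stated objective: faster
-- what changed: replaced the decrementing while-loop with a closed-form formula 2*(a - (1 if a>=5 else 0)) for a>0 else 0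
import Mathlib
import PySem

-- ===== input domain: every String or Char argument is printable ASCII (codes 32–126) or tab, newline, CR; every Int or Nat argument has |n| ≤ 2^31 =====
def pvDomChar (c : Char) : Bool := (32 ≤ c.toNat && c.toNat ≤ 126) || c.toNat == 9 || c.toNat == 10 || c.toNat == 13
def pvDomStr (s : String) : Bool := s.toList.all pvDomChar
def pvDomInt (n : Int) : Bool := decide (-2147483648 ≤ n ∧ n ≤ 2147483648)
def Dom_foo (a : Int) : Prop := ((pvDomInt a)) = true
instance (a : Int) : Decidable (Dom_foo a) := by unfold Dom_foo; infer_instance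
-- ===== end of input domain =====

-- B replaces A's decrementing while-loop by a closed-form formula (O(1) vs O(a)).


-- ===== PORT A =====
-- literal port of A's while-loop: state (a, j), decrement a each step, add 2 unless a == 5
def fooLoop (a j : Int) : Int :=
  if a > 0 then
    if a == 5 then fooLoop (a - 1) j
    else fooLoop (a - 1) (j + 2)
  else j
termination_by a.toNat
decreasing_by all_goals omega

def foo (a : Int) : Int := fooLoop a 0

-- ===== PORT B =====
def foo_alt (a : Int) : Int :=
  if a ≤ 0 then 0
  else if a ≥ 5 then 2 * (a - 1) else 2 * a

-- ===== PRECONDITION & SPEC =====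
def Spec_foo (a : Int) (out : Int) : Prop := out = foo_alt a
instance (a : Int) (out : Int) : Decidable (Spec_foo a out) := by unfold Spec_foo; infer_instance

-- ===== CLAIM (what is proved, stated in full; the proofs are below) =====
def Claim_equal_foo : Prop := ∀ (a : Int), Dom_foo a → Spec_foo a (foo a)

-- ===== LEMMAS AND PROOFS =====
theorem fooLoop_closed (a j : Int) :
    fooLoop a j = j + (if a > 0 then (if a ≥ 5 then 2 * (a - 1) else 2 * a) else 0) := by
  by_cases h : a > 0
  · rw [fooLoop]
    have ih := fooLoop_closed (a - 1)
    by_cases h5 : a = 5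
    · subst h5
      rw [ih]
      norm_num
    · have : (a == 5) = false := by simp [h5]
      simp only [if_pos h, this, Bool.false_eq_true, if_false, ih]
      split_ifs <;> omega
  · rw [fooLoop]
    simp [h]
termination_by a.toNat
decreasing_by all_goals omega

-- ===== VERDICT (by name: the statement is the Claim_ definition above) =====
theorem foo_spec : Claim_equal_foo := by
  intro a _
  unfold Spec_foo foo foo_alt
  rw [fooLoop_closed]
  split_ifs <;> omega
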